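-- pv_equiv track=rewrite | github.com/cauasenna/PNT | Funções/At.2 - Funções.py | processa_sentencas
-- ===== SOURCE A (Python) =====
-- def verifica_parenteses(sentenca, contador=0):
--     # Caso base: Se a string está vazia
--     if not sentenca:
--         return contador
--     # Incrementa se o primeiro caractere for '('
--     if sentenca[0] == '(':
--         return verifica_parenteses(sentenca[1:], contador + 1)
--     # Decrementa se o primeiro caractere for ')'
--     elif sentenca[0] == ')':
--         return verifica_parenteses(sentenca[1:], contador - 1)
--     # Continua verificando se o caractere não é parêntese
--     else:
--         return verifica_parenteses(sentenca[1:], contador)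
--
-- def processa_sentencas(sentencas):
--     resultados = []
--     for sentenca in sentencas:
--         resultado = verifica_parenteses(sentenca)
--         if resultado == 0:
--             resultados.append("Essa sentença está com os parênteses balanceados, HOORAY!")
--         elif resultado > 0:
--             resultados.append("A quantidade de parênteses '(' está maior que a de ')', vamos descartá-la")
--         else:
--             resultados.append("A quantidade de parênteses ')' está maior que a de '(', vamos descartá-la")
--     return resultados
-- ===== SOURCE B (Python) =====
-- def processa_sentencas(sentencas):
--     def classifica(sentenca):
--         saldo = sentenca.count('(') - sentenca.count(')')
--         if saldo == 0:
--             return "Essa sentença está com os parênteses balanceados, HOORAY!"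
--         elif saldo > 0:
--             return "A quantidade de parênteses '(' está maior que a de ')', vamos descartá-la"
--         else:
--             return "A quantidade de parênteses ')' está maior que a de '(', vamos descartá-la"
--     return [classifica(s) for s in sentencas]
-- ===== Notes on version B (the rewrite author's own statement) =====
-- stated objective: idiomatic
-- what changed: Replaces the slicing accumulator-recursion over characters by str.count('(') - str.count(')') per sentence and the explicit append loop by a list comprehension.
import Mathlib
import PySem

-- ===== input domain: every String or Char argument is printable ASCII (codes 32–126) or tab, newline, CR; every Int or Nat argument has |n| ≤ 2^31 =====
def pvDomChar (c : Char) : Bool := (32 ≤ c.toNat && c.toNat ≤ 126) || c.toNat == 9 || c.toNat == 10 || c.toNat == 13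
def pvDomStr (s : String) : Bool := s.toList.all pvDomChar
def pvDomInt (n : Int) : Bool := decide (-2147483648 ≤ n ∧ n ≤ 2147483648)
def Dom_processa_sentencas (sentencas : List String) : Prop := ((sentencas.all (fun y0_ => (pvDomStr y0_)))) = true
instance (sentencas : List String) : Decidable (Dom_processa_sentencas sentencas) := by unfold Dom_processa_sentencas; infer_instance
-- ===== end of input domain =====

-- B replaces the slicing accumulator-recursion with per-sentence str.count('(') - str.count(')') and a list comprehension (idiomatic, same cost).


-- ===== PORT A =====
def verifica_parenteses (sentenca : List Char) (contador : Int) : Int :=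
  match sentenca with
  | [] => contador
  | c :: resto =>
    if c = '(' then verifica_parenteses resto (contador + 1)
    else if c = ')' then verifica_parenteses resto (contador - 1)
    else verifica_parenteses resto contador

def processa_sentencas (sentencas : List String) : List String :=
  sentencas.foldl (fun resultados sentenca =>
    let resultado := verifica_parenteses sentenca.toList 0
    if resultado = 0 then
      resultados ++ ["Essa sentença está com os parênteses balanceados, HOORAY!"]
    else if resultado > 0 then
      resultados ++ ["A quantidade de parênteses '(' está maior que a de ')', vamos descartá-la"]
    else
      resultados ++ ["A quantidade de parênteses ')' está maior que a de '(', vamos descartá-la"]) []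

-- ===== PORT B =====
def pvClassifica (sentenca : String) : String :=
  let saldo : Int := (PySem.Str.count sentenca "(" : Int) - (PySem.Str.count sentenca ")" : Int)
  if saldo = 0 then "Essa sentença está com os parênteses balanceados, HOORAY!"
  else if saldo > 0 then "A quantidade de parênteses '(' está maior que a de ')', vamos descartá-la"
  else "A quantidade de parênteses ')' está maior que a de '(', vamos descartá-la"

def processa_sentencas_alt (sentencas : List String) : List String :=
  sentencas.map pvClassifica

-- ===== PRECONDITION & SPEC =====
def Spec_processa_sentencas (sentencas : List String) (out : List String) : Prop := out = processa_sentencas_alt sentencas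
instance (sentencas : List String) (out : List String) : Decidable (Spec_processa_sentencas sentencas out) := by unfold Spec_processa_sentencas; infer_instance

-- ===== CLAIM (what is proved, stated in full; the proofs are below) =====
def Claim_equal_processa_sentencas : Prop := ∀ (sentencas : List String), Dom_processa_sentencas sentencas → Spec_processa_sentencas sentencas (processa_sentencas sentencas)

-- ===== LEMMAS AND PROOFS =====

-- single-character substring count is the character count
theorem chars_count_single (c : Char) (cs : List Char) :
    PySem.Chars.count cs [c] = cs.count c := by
  have go : ∀ (cs : List Char) (fuel acc : Nat), cs.length ≤ fuel →
      PySem.Chars.count.go [c] fuel cs acc = acc + cs.count c := by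
    intro cs
    induction cs with
    | nil => intro fuel acc _; cases fuel <;> simp [PySem.Chars.count.go]
    | cons h t ih =>
      intro fuel acc hle
      cases fuel with
      | zero => simp at hle
      | succ f =>
        simp only [PySem.Chars.count.go]
        by_cases hc : h = c
        · subst hc
          simp only [List.isPrefixOf, beq_self_eq_true, Bool.true_and, if_true,
            List.length_cons, List.length_nil, Nat.zero_add, List.drop_succ_cons, List.drop_zero]
          rw [ih f (acc + 1) (by simpa using hle)]
          simp
          omega
        · have : ([c].isPrefixOf (h :: t)) = false := by
            simp [List.isPrefixOf]
            exact fun h' => absurd h'.symm hc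
          rw [this]
          simp only [if_false, Bool.false_eq_true]
          rw [ih f acc (by simpa using Nat.le_of_succ_le_succ hle)]
          simp [hc]
  simp only [PySem.Chars.count]
  simp only [List.isEmpty, Bool.false_eq_true, if_false]
  simpa using go cs cs.length 0 (le_refl _)

theorem verifica_eq_counts (cs : List Char) (acc : Int) :
    verifica_parenteses cs acc = acc + (cs.count '(' : Int) - (cs.count ')' : Int) := by
  induction cs generalizing acc with
  | nil => simp [verifica_parenteses]
  | cons h t ih =>
    simp only [verifica_parenteses]
    split_ifs with h1 h2
    · subst h1; rw [ih]; simp; ring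
    · subst h2; rw [ih]; simp [h1]; ring
    · rw [ih]; simp [h1, h2]

theorem classify_eq (s : String) :
    (let resultado := verifica_parenteses s.toList 0
     if resultado = 0 then
       "Essa sentença está com os parênteses balanceados, HOORAY!"
     else if resultado > 0 then
       "A quantidade de parênteses '(' está maior que a de ')', vamos descartá-la"
     else
       "A quantidade de parênteses ')' está maior que a de '(', vamos descartá-la") = pvClassifica s := by
  have hv : verifica_parenteses s.toList 0 =
      (PySem.Str.count s "(" : Int) - (PySem.Str.count s ")" : Int) := by
    rw [verifica_eq_counts]
    simp [PySem.Str.count_eq, chars_count_single]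
  simp only [pvClassifica, hv]

-- ===== VERDICT (by name: the statement is the Claim_ definition above) =====
theorem processa_sentencas_spec : Claim_equal_processa_sentencas := by
  intro sentencas _
  unfold Spec_processa_sentencas processa_sentencas processa_sentencas_alt
  have hbody : (fun (resultados : List String) (sentenca : String) =>
      let resultado := verifica_parenteses sentenca.toList 0
      if resultado = 0 then
        resultados ++ ["Essa sentença está com os parênteses balanceados, HOORAY!"]
      else if resultado > 0 then
        resultados ++ ["A quantidade de parênteses '(' está maior que a de ')', vamos descartá-la"]
      else
        resultados ++ ["A quantidade de parênteses ')' está maior que a de '(', vamos descartá-la"]) =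
      (fun resultados sentenca => resultados ++ [pvClassifica sentenca]) := by
    funext r s
    rw [← classify_eq s]
    simp only []
    split_ifs <;> rfl
  rw [hbody, PySem.List.foldl_append_singleton_eq_map]
  simp
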